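-- pv_equiv track=rewrite | github.com/ChristianTaborda/SAT | Reductor/Reductor.py | repetida
-- ===== SOURCE A (Python) =====
-- def repetida(combinacion):
--   combinacion = list(map(abs,combinacion))
--   combinacionFiltrada = []
--   for i in combinacion:
--     if (i not in combinacionFiltrada):
--       combinacionFiltrada.append(i)
--   if (len(combinacion) > len(combinacionFiltrada)):
--     return True
--   else:
--     return False
-- ===== SOURCE B (Python) =====
-- def repetida(combinacion):
--   s = sorted(map(abs, combinacion))
--   return any(x == y for x, y in zip(s, s[1:]))
-- ===== Notes on version B (the rewrite author's own statement) =====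
-- stated objective: simpler
-- what changed: Replaces the quadratic membership-based dedup (grow a list, compare lengths) with sort-then-adjacent-equality: sort the absolute values once and report whether any neighbouring pair is equal.
import Mathlib
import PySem

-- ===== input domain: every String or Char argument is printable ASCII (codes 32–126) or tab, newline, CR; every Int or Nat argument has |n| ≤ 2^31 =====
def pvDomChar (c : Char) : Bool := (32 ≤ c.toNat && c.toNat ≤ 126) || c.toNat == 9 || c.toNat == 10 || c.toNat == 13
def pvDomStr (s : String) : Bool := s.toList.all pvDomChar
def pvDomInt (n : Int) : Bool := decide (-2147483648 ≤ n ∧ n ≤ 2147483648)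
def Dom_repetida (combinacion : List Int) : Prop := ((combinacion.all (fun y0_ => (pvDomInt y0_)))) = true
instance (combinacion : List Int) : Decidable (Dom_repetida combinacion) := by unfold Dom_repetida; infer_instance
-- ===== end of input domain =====

-- B replaces A's quadratic membership-based dedup-and-compare-lengths with a sort of the
-- absolute values followed by one adjacent-equality scan (objective: simpler).

-- ===== PORT A =====
def repetida (combinacion : List Int) : Bool :=
  let m := combinacion.map (fun x => |x|)
  let filt := m.foldl (fun acc i => if i ∈ acc then acc else acc ++ [i]) []
  decide (m.length > filt.length)

-- ===== PORT B =====
def repetida_alt (combinacion : List Int) : Bool :=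
  let s := PySem.List.sorted (combinacion.map (fun x => |x|)) (fun x => x) false
  (s.zip (PySem.List.slice s (some 1) none)).any (fun p => p.1 == p.2)

-- ===== PRECONDITION & SPEC =====
def Spec_repetida (combinacion : List Int) (out : Bool) : Prop := out = repetida_alt combinacion
instance (combinacion : List Int) (out : Bool) : Decidable (Spec_repetida combinacion out) := by unfold Spec_repetida; infer_instance

-- ===== CLAIM (what is proved, stated in full; the proofs are below) =====
def Claim_equal_repetida : Prop := ∀ (combinacion : List Int), Dom_repetida combinacion → Spec_repetida combinacion (repetida combinacion)

-- ===== LEMMAS AND PROOFS =====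

-- A's dedup fold: the result is nodup and collects exactly the elements seen.
theorem pv_fold_nodup_toFinset (m : List Int) : ∀ (acc : List Int), acc.Nodup →
    (m.foldl (fun acc i => if i ∈ acc then acc else acc ++ [i]) acc).Nodup ∧
    (m.foldl (fun acc i => if i ∈ acc then acc else acc ++ [i]) acc).toFinset = acc.toFinset ∪ m.toFinset := by
  induction m with
  | nil => intro acc h; simpa using h
  | cons a t ih =>
    intro acc h
    simp only [List.foldl_cons]
    by_cases hmem : a ∈ acc
    · simp only [if_pos hmem]
      obtain ⟨h1, h2⟩ := ih acc h
      refine ⟨h1, ?_⟩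
      rw [h2]
      ext x
      simp only [Finset.mem_union, List.mem_toFinset, List.mem_cons]
      constructor
      · rintro (hx | hx) <;> tauto
      · rintro (hx | (rfl | hx)) <;> tauto
    · simp only [if_neg hmem]
      have hn : (acc ++ [a]).Nodup := by
        refine List.Nodup.append h (by simp) ?_
        intro x hx hx'
        simp only [List.mem_singleton] at hx'
        exact hmem (hx' ▸ hx)
      obtain ⟨h1, h2⟩ := ih (acc ++ [a]) hn
      refine ⟨h1, ?_⟩
      rw [h2]
      ext x
      simp only [Finset.mem_union, List.mem_toFinset, List.mem_append, List.mem_cons]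
      tauto

-- A returns true iff the list of absolute values has a repeat.
theorem pv_A_iff (m : List Int) :
    m.length > (m.foldl (fun acc i => if i ∈ acc then acc else acc ++ [i]) []).length ↔ ¬ m.Nodup := by
  obtain ⟨h1, h2⟩ := pv_fold_nodup_toFinset m [] List.nodup_nil
  have hc : (m.foldl (fun acc i => if i ∈ acc then acc else acc ++ [i]) []).length = m.toFinset.card := by
    rw [← List.toFinset_card_of_nodup h1, h2]; simp
  rw [hc, List.card_toFinset]
  have hsub : m.dedup.Sublist m := m.dedup_sublist
  have hle : m.dedup.length ≤ m.length := hsub.length_le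
  constructor
  · intro hlt hnd
    rw [List.Nodup.dedup hnd] at hlt
    omega
  · intro hnd
    rcases lt_or_eq_of_le hle with h | h
    · omega
    · have heq := hsub.eq_of_length h
      exact absurd (heq ▸ m.nodup_dedup) hnd

-- B's adjacent scan on a ≤-sorted list detects exactly non-nodup.
theorem pv_adj_iff : ∀ (s : List Int), s.Pairwise (· ≤ ·) →
    ((s.zip (s.drop 1)).any (fun p => p.1 == p.2) = true ↔ ¬ s.Nodup) := by
  intro s
  induction s with
  | nil => simp
  | cons a t ih =>
    intro hp
    cases t with
    | nil => simp
    | cons b u =>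
      have hp' : (b :: u).Pairwise (· ≤ ·) := hp.of_cons
      have hab : a ≤ b := (List.pairwise_cons.mp hp).1 b (by simp)
      have hmem : a ∈ b :: u ↔ a = b := by
        constructor
        · intro h
          rcases List.mem_cons.mp h with h | h
          · exact h
          · have hba : b ≤ a := (List.pairwise_cons.mp hp').1 a h
            omega
        · intro h; simp [h]
      simp only [List.drop_succ_cons, List.drop_zero, List.zip_cons_cons, List.any_cons,
        Bool.or_eq_true, beq_iff_eq]
      simp only [List.drop_succ_cons, List.drop_zero] at ih
      rw [ih hp']
      constructor
      · rintro (h | h) hc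
        · exact (List.nodup_cons.mp hc).1 (hmem.mpr h)
        · exact h (List.nodup_cons.mp hc).2
      · intro h
        by_cases hb : a = b
        · exact Or.inl hb
        · right; intro hnd
          exact h (List.nodup_cons.mpr ⟨fun hm2 => hb (hmem.mp hm2), hnd⟩)

-- ===== VERDICT (by name: the statement is the Claim_ definition above) =====
theorem repetida_spec : Claim_equal_repetida := by
  intro combinacion _
  unfold Spec_repetida repetida repetida_alt
  dsimp only
  rw [PySem.List.slice_from_one, ← List.drop_one]
  set m := combinacion.map (fun x => |x|) with hm
  have hperm := PySem.List.sorted_perm m (fun x => x) false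
  have hpair := PySem.List.sorted_pairwise (xs := m) (key := fun x => x)
  set s := PySem.List.sorted m (fun x => x) false with hs
  have h1 := pv_A_iff m
  have h2 := pv_adj_iff s hpair
  have hnd : s.Nodup ↔ m.Nodup := hperm.nodup_iff
  rw [← hnd] at h1
  rw [Bool.eq_iff_iff, decide_eq_true_iff, h1, h2]
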